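-- pv_equiv track=rewrite | github.com/Nao-Shirotsu/zeikin_calculator | tedori_calc.py | replace_space_to_nbsp
-- ===== SOURCE A (Python) =====
-- def replace_space_to_nbsp(str):
--     out_str = ''
--     for c in str:
--         if c == ' ':
--             out_str += '&nbsp;'
--         else:
--             out_str += c
--     return out_str
-- ===== SOURCE B (Python) =====
-- def replace_space_to_nbsp(str):
--     return '&nbsp;'.join(str.split(' '))
-- ===== Notes on version B (the rewrite author's own statement) =====
-- stated objective: idiomatic
-- what changed: Replaced the per-character accumulation loop with its if/else branch by a two-phase strategy: split the string on spaces, then join the fragments with the entity.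
import Mathlib
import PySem

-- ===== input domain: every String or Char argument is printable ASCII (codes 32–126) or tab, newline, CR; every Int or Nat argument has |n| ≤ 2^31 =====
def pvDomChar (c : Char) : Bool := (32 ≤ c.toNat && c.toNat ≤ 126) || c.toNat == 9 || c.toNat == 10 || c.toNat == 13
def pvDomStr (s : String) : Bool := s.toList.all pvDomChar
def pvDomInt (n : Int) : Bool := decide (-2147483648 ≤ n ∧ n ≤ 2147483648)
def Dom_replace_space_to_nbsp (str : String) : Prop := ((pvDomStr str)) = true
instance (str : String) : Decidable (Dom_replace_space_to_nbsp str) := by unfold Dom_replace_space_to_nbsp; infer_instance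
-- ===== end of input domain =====

-- B replaces A's per-character accumulation loop by split-on-space + join-with-'&nbsp;' (idiomatic; return value proved equal).

-- ===== PORT A =====
-- out_str accumulation done over List Char (Lean's own String append is opaque); exact for strings.
def replace_space_to_nbsp (str : String) : String :=
  String.ofList
    (str.toList.foldl
      (fun out_str c => out_str ++ (if c = ' ' then "&nbsp;".toList else [c])) [])

-- ===== PORT B =====
-- '&nbsp;'.join(str.split(' ')): sep " " is nonempty, so Python's split is exactly Chars.splitOn.
def replace_space_to_nbsp_alt (str : String) : String :=
  String.ofList (PySem.Chars.join "&nbsp;".toList (PySem.Chars.splitOn str.toList [' ']))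

-- ===== PRECONDITION & SPEC =====
def Spec_replace_space_to_nbsp (str : String) (out : String) : Prop := out = replace_space_to_nbsp_alt str
instance (str : String) (out : String) : Decidable (Spec_replace_space_to_nbsp str out) := by unfold Spec_replace_space_to_nbsp; infer_instance

-- ===== CLAIM (what is proved, stated in full; the proofs are below) =====
def Claim_equal_replace_space_to_nbsp : Prop := ∀ (str : String), Dom_replace_space_to_nbsp str → Spec_replace_space_to_nbsp str (replace_space_to_nbsp str)

-- ===== LEMMAS AND PROOFS =====

-- structural description of splitOn on the single-character separator [' ']
def pvSplitChar : List Char → List Char → List (List Char)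
  | [], cur => [cur.reverse]
  | c :: rest, cur => if c = ' ' then cur.reverse :: pvSplitChar rest [] else pvSplitChar rest (c :: cur)

lemma pvGo_spec (fuel : Nat) (l cur : List Char) (acc : List (List Char))
    (h : l.length ≤ fuel) :
    PySem.Chars.splitOn.go [' '] fuel l cur acc = acc.reverse ++ pvSplitChar l cur := by
  induction fuel generalizing l cur acc with
  | zero =>
    match l, h with
    | [], _ => simp [PySem.Chars.splitOn.go, pvSplitChar]
  | succ n ih =>
    match l with
    | [] => simp [PySem.Chars.splitOn.go, pvSplitChar]
    | c :: rest =>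
      simp only [PySem.Chars.splitOn.go, List.isPrefixOf, pvSplitChar]
      have hrest : rest.length ≤ n := by simpa using Nat.le_of_succ_le_succ (by simpa using h)
      by_cases hc : c = ' '
      · simp only [hc, beq_self_eq_true, Bool.true_and, if_true]
        rw [show List.drop [' '].length (' ' :: rest) = rest from rfl,
            ih rest [] (cur.reverse :: acc) hrest]
        simp
      · have hb : (' ' == c) = false := by
          simp only [beq_eq_false_iff_ne, ne_eq]; exact fun e => hc e.symm
        simp only [hb, Bool.false_and, Bool.false_eq_true, if_false, if_neg hc]
        exact ih rest (c :: cur) acc hrest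

lemma pvSplitOn_eq (l : List Char) :
    PySem.Chars.splitOn l [' '] = pvSplitChar l [] := by
  unfold PySem.Chars.splitOn
  simpa using pvGo_spec (l.length + 1) l [] [] (by omega)

def pvNB : List Char := "&nbsp;".toList

def pvG (c : Char) : List Char := if c = ' ' then pvNB else [c]

lemma pvSplitChar_ne_nil (l cur : List Char) : pvSplitChar l cur ≠ [] := by
  induction l generalizing cur with
  | nil => simp [pvSplitChar]
  | cons c rest ih =>
    simp only [pvSplitChar]
    split
    · simp
    · exact ih _

lemma pvJoin_cons (a : List Char) (S : List (List Char)) (hS : S ≠ []) :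
    PySem.Chars.join pvNB (a :: S) = a ++ pvNB ++ PySem.Chars.join pvNB S := by
  match S, hS with
  | b :: S', _ =>
    simp [PySem.Chars.join, List.intercalate, List.intersperse, List.flatten, List.append_assoc]

lemma pvJoin_splitChar (l cur : List Char) :
    PySem.Chars.join pvNB (pvSplitChar l cur) = cur.reverse ++ l.flatMap pvG := by
  induction l generalizing cur with
  | nil => simp [pvSplitChar, PySem.Chars.join, List.intercalate]
  | cons c rest ih =>
    simp only [pvSplitChar]
    by_cases hc : c = ' '
    · rw [if_pos hc, pvJoin_cons _ _ (pvSplitChar_ne_nil _ _), ih []]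
      simp [hc, pvG, List.flatMap_cons, List.append_assoc]
    · rw [if_neg hc, ih (c :: cur)]
      simp [pvG, hc, List.flatMap_cons, List.append_assoc]

-- ===== VERDICT (by name: the statement is the Claim_ definition above) =====
theorem replace_space_to_nbsp_spec : Claim_equal_replace_space_to_nbsp := by
  intro str _
  unfold Spec_replace_space_to_nbsp replace_space_to_nbsp replace_space_to_nbsp_alt
  rw [pvSplitOn_eq]
  have h1 : PySem.Chars.join "&nbsp;".toList (pvSplitChar str.toList []) =
      str.toList.flatMap pvG := by simpa [pvNB] using pvJoin_splitChar str.toList []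
  rw [h1]
  have h2 := PySem.List.foldl_append_eq_flatMap pvG str.toList []
  simp only [pvG, pvNB] at h2
  rw [h2]
  simp
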